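-- pv_equiv track=rewrite | github.com/Leonamin/m3u8_downloader | util/m3u8_utils.py | get_highest_quality_media_playlist_url
-- ===== SOURCE A (Python) =====
-- def get_highest_quality_media_playlist_url(m3u8_content, base_url):
--     lines = m3u8_content.split('\n')
--     highest_quality_stream_url = None
--     for line in lines:
--         if line.startswith('#EXT-X-STREAM-INF'):
--             highest_quality_stream_url = None  # 다음 스트림 URL을 확인하기 위해 초기화
--         elif line and not line.startswith('#') and not highest_quality_stream_url:
--             # 스트림 URL을 저장 (가장 마지막에 나온 URL을 최종적으로 사용)
--             highest_quality_stream_url = base_url + line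
--     return highest_quality_stream_url
-- ===== SOURCE B (Python) =====
-- def get_highest_quality_media_playlist_url(m3u8_content, base_url):
--     # Scan backwards: keep the earliest URL line seen so far; the moment we hit a
--     # STREAM-INF marker (the last one in the file) that candidate is the answer.
--     candidate = None
--     for line in reversed(m3u8_content.split('\n')):
--         if line.startswith('#EXT-X-STREAM-INF'):
--             break
--         if line and not line.startswith('#'):
--             candidate = line
--     return base_url + candidate if candidate is not None else None
-- ===== Notes on version B (the rewrite author's own statement) =====
-- stated objective: alternative
-- what changed: Replaces A's forward reset-and-capture loop over all lines with a single backwards scan that keeps the earliest URL line seen and stops early at the last #EXT-X-STREAM-INF marker.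
import Mathlib
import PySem

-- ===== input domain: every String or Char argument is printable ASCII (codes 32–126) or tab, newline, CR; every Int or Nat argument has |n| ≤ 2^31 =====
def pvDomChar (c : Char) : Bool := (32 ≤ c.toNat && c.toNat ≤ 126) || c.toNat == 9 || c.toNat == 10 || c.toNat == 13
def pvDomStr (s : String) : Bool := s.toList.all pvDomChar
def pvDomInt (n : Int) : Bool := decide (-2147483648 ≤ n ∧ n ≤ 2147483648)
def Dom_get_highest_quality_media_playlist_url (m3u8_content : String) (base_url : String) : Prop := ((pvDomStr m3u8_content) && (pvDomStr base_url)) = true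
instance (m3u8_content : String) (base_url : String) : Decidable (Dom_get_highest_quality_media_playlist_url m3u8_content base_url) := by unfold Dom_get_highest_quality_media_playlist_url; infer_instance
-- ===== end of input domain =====

-- B replaces A's forward reset-and-capture loop with a backwards scan that keeps the
-- earliest URL line seen and stops at the last #EXT-X-STREAM-INF marker (alternative
-- decomposition, same return value on every input).

-- shared line predicates (the two Pythons use the same startswith/truthiness tests)
def pvMarker (line : String) : Bool := PySem.Str.startswith line "#EXT-X-STREAM-INF"
def pvGood (line : String) : Bool := (line != "") && !(PySem.Str.startswith line "#")
-- Python truthiness of the Optional[str] accumulator: None and "" are falsy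
def pvFalsy : Option String → Bool
  | none => true
  | some s => s == ""

-- ===== PORT A =====
def get_highest_quality_media_playlist_url (m3u8_content : String) (base_url : String) : Option String :=
  -- split('\n') with the non-empty literal separator never raises, so getD [] is exact
  ((PySem.Str.split? m3u8_content "\n").getD []).foldl (fun highest_quality_stream_url line =>
    if pvMarker line then
      none
    else if pvGood line && pvFalsy highest_quality_stream_url then
      some (base_url ++ line)
    else
      highest_quality_stream_url) none

-- ===== PORT B =====
-- the backwards loop of Source B: break at a marker, else update the candidate
def pvAltGo : List String → Option String → Option String
  | [], candidate => candidate
  | line :: rest, candidate =>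
      if pvMarker line then candidate
      else pvAltGo rest (if pvGood line then some line else candidate)

def get_highest_quality_media_playlist_url_alt (m3u8_content : String) (base_url : String) : Option String :=
  match pvAltGo ((PySem.Str.split? m3u8_content "\n").getD []).reverse none with
  | none => none
  | some candidate => some (base_url ++ candidate)

-- ===== PRECONDITION & SPEC =====
def Spec_get_highest_quality_media_playlist_url (m3u8_content : String) (base_url : String) (out : Option String) : Prop := out = get_highest_quality_media_playlist_url_alt m3u8_content base_url
instance (m3u8_content : String) (base_url : String) (out : Option String) : Decidable (Spec_get_highest_quality_media_playlist_url m3u8_content base_url out) := by unfold Spec_get_highest_quality_media_playlist_url; infer_instance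

-- ===== CLAIM (what is proved, stated in full; the proofs are below) =====
def Claim_equal_get_highest_quality_media_playlist_url : Prop := ∀ (m3u8_content : String) (base_url : String), Dom_get_highest_quality_media_playlist_url m3u8_content base_url → Spec_get_highest_quality_media_playlist_url m3u8_content base_url (get_highest_quality_media_playlist_url m3u8_content base_url)

-- ===== LEMMAS AND PROOFS =====

-- A's step and B's candidate-update, named for the lemmas
def pvStepA (b : String) (acc : Option String) (line : String) : Option String :=
  if pvMarker line then none
  else if pvGood line && pvFalsy acc then some (b ++ line)
  else acc

def pvUpd (c : Option String) (line : String) : Option String :=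
  if pvGood line then some line else c

-- a good line is non-empty, so the value A stores is never falsy
lemma pvFalsy_cap (b l : String) (hg : pvGood l = true) :
    pvFalsy (some (b ++ l)) = false := by
  simp only [pvFalsy, beq_eq_false_iff_ne, ne_eq]
  intro h
  have := congrArg String.toList h
  rw [String.toList_append] at this
  simp at this
  simp [pvGood, this.2] at hg

-- A over a marker-free segment: if the accumulator is empty, take the first good line
lemma pvA_no_marker (b : String) (ds : List String) :
    ∀ (a : Option String), (∀ l ∈ ds, pvMarker l = false) →
    (a = none ∨ pvFalsy a = false) →
    ds.foldl (pvStepA b) a = if a = none then (ds.find? pvGood).map (b ++ ·) else a := by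
  induction ds with
  | nil => intro a _ _; cases a <;> simp
  | cons l t ih =>
    intro a hm hwf
    have hml : pvMarker l = false := hm l (by simp)
    have hmt : ∀ x ∈ t, pvMarker x = false := fun x hx => hm x (by simp [hx])
    rcases hwf with rfl | hf
    · by_cases hg : pvGood l = true
      · have : pvStepA b none l = some (b ++ l) := by simp [pvStepA, hml, hg, pvFalsy]
        rw [List.foldl_cons, this,
          ih (some (b ++ l)) hmt (Or.inr (pvFalsy_cap b l hg))]
        simp [List.find?, hg]
      · have hg' : pvGood l = false := by simpa using hg
        have : pvStepA b none l = none := by simp [pvStepA, hml, hg', pvFalsy]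
        rw [List.foldl_cons, this, ih none hmt (Or.inl rfl)]
        simp [List.find?, hg']
    · have ha : a ≠ none := by intro h; rw [h] at hf; simp [pvFalsy] at hf
      have : pvStepA b a l = a := by simp [pvStepA, hml, hf]
      rw [List.foldl_cons, this, ih a hmt (Or.inr hf)]
      simp [ha]
  -- (the `if a = none` collapses since a ≠ none)

-- B's candidate fold keeps the last good line = first good line of the reverse
lemma pvUpd_foldl (p : List String) :
    ∀ cand, p.foldl pvUpd cand = (p.reverse.find? pvGood).or cand := by
  induction p using List.reverseRecOn with
  | nil => intro cand; simp
  | append_singleton ds l ih =>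
    intro cand
    rw [List.foldl_append, List.reverse_append]
    simp only [List.foldl_cons, List.foldl_nil, List.reverse_singleton,
      List.singleton_append, List.find?, ih]
    by_cases hg : pvGood l = true
    · simp [pvUpd, hg]
    · have hg' : pvGood l = false := by simpa using hg
      simp [pvUpd, hg']

-- B runs straight through a marker-free prefix, folding the candidate
lemma pvAltGo_append (p : List String) :
    ∀ (rest : List String) (cand : Option String), (∀ l ∈ p, pvMarker l = false) →
    pvAltGo (p ++ rest) cand = pvAltGo rest (p.foldl pvUpd cand) := by
  induction p with
  | nil => intro rest cand _; rfl
  | cons l t ih =>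
    intro rest cand hm
    have hml : pvMarker l = false := hm l (by simp)
    rw [List.cons_append]
    show (if pvMarker l then cand else pvAltGo (t ++ rest) (pvUpd cand l)) = _
    rw [hml]
    simp only [Bool.false_eq_true, if_false, List.foldl_cons]
    exact ih rest (pvUpd cand l) (fun x hx => hm x (by simp [hx]))

-- first element of a dropWhile does not satisfy the predicate
lemma pvHead_dropWhile (p : String → Bool) (l : List String) (x : String) (xs : List String)
    (h : l.dropWhile p = x :: xs) : p x = false := by
  have hne : l.dropWhile p ≠ [] := by simp [h]
  have h2 := List.head_dropWhile_not (l := l) (p := p) hne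
  have h3 : (l.dropWhile p).head hne = x := by simp [h]
  rwa [h3] at h2

-- the heart: A's fold equals B's backwards scan, for any line list
lemma pv_key (b : String) (lines : List String) :
    lines.foldl (pvStepA b) none =
      (pvAltGo lines.reverse none).map (b ++ ·) := by
  by_cases hany : lines.any pvMarker = true
  · -- there is a marker; split lines.reverse at its first marker
    set r := lines.reverse with hr
    have hanyr : r.any pvMarker = true := by
      simpa [hr] using hany
    set p := r.takeWhile (fun l => !pvMarker l) with hp
    have hsplit : p ++ r.dropWhile (fun l => !pvMarker l) = r :=
      List.takeWhile_append_dropWhile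
    have hpm : ∀ l ∈ p, pvMarker l = false := by
      intro l hl
      have := List.mem_takeWhile_imp hl
      simpa using this
    cases hd : r.dropWhile (fun l => !pvMarker l) with
    | nil =>
      exfalso
      rw [hd, List.append_nil] at hsplit
      obtain ⟨x, hx, hmx⟩ := List.any_eq_true.mp hanyr
      have := hpm x (hsplit ▸ hx)
      rw [this] at hmx; exact Bool.false_ne_true hmx
    | cons m q =>
      have hmm : pvMarker m = true := by
        simpa using pvHead_dropWhile (fun l => !pvMarker l) r m q hd
      rw [hd] at hsplit
      -- lines = q.reverse ++ m :: p.reverse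
      have hlines : lines = q.reverse ++ m :: p.reverse := by
        have h4 : r.reverse = lines := by rw [hr, List.reverse_reverse]
        rw [← h4, ← hsplit]
        simp
      -- A side
      have hA : lines.foldl (pvStepA b) none = (p.reverse.find? pvGood).map (b ++ ·) := by
        rw [hlines, List.foldl_append, List.foldl_cons]
        have hstep : pvStepA b (q.reverse.foldl (pvStepA b) none) m = none := by
          simp [pvStepA, hmm]
        rw [hstep, pvA_no_marker b p.reverse none
          (fun l hl => hpm l (by simpa using hl)) (Or.inl rfl)]
        simp
      -- B side
      have hB : pvAltGo lines.reverse none = p.reverse.find? pvGood := by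
        rw [← hr, ← hsplit, pvAltGo_append p (m :: q) none hpm]
        show (if pvMarker m then p.foldl pvUpd none else _) = _
        rw [hmm]
        simp only [if_true, pvUpd_foldl]
        simp
      rw [hA, hB]
  · -- no marker anywhere
    have hnm : ∀ l ∈ lines, pvMarker l = false := by
      intro l hl
      by_contra h
      exact hany (List.any_eq_true.mpr ⟨l, hl, by simpa using h⟩)
    rw [pvA_no_marker b lines none hnm (Or.inl rfl)]
    have hB : pvAltGo lines.reverse none = lines.find? pvGood := by
      have h5 := pvAltGo_append lines.reverse [] none
        (fun l hl => hnm l (by simpa using hl))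
      rw [List.append_nil] at h5
      rw [h5]
      show lines.reverse.foldl pvUpd none = _
      rw [pvUpd_foldl]
      simp
    rw [hB]
    simp

-- ===== VERDICT (by name: the statement is the Claim_ definition above) =====
theorem get_highest_quality_media_playlist_url_spec : Claim_equal_get_highest_quality_media_playlist_url := by
  intro c b _
  show get_highest_quality_media_playlist_url c b = get_highest_quality_media_playlist_url_alt c b
  show ((PySem.Str.split? c "\n").getD []).foldl (pvStepA b) none =
    match pvAltGo ((PySem.Str.split? c "\n").getD []).reverse none with
    | none => none
    | some candidate => some (b ++ candidate)
  rw [pv_key b ((PySem.Str.split? c "\n").getD [])]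
  cases pvAltGo ((PySem.Str.split? c "\n").getD []).reverse none <;> simp
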